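-- pv_equiv track=rewrite | github.com/onera/standalone-vta | src/compiler/vta_compiler/matrix_partitioning/utils_strategies.py | get_operations
-- ===== SOURCE A (Python) =====
-- def euclidian_division(dividend, divisor):
--     """
--     Euclidian division: dividend = divisor * quotient + remainder
--     Inputs:
--         - dividend: (int) the number to decompose
--         - divisor: (int) the modulo
--     Outputs:
--         - quotient: (int) result of dividend // divisor
--         - remainder: (int) result of dividenc % divisor
--     """
--     return dividend // divisor, dividend % divisor
--
-- def get_operations(load_A, load_B, A_blocks_col, B_blocks_col, X_blocks_col):
--     """
--     Generates the list of GeMM operations for a given set of loaded A and B blocks.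
--     An operation is valid if a block A[i, k] and a block B[k, j] are both loaded.
--     The result is accumulated in C[i, j].
--     """
--     operations = []
--     # Create a lookup for B blocks for faster access: map row_k to list of (col_j, B_idx)
--     b_lookup = {}
--     for b_idx in load_B:
--         k, j = euclidian_division(b_idx, B_blocks_col)
--         if k not in b_lookup:
--             b_lookup[k] = []
--         b_lookup[k].append((j, b_idx))
--
--     # Iterate through loaded A blocks
--     for a_idx in load_A:
--         i, k = euclidian_division(a_idx, A_blocks_col)
--
--         # Check if there are any B blocks with a matching row index 'k'
--         if k in b_lookup:
--             # For each matching B block, create a GeMM operation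
--             for j, b_idx in b_lookup[k]:
--                 c_idx = i * X_blocks_col + j
--                 operations.append(("GeMM", c_idx, a_idx, b_idx))
--
--     return operations
-- ===== SOURCE B (Python) =====
-- def euclidian_division(dividend, divisor):
--     return dividend // divisor, dividend % divisor
--
-- def get_operations(load_A, load_B, A_blocks_col, B_blocks_col, X_blocks_col):
--     """Nested double scan: for each loaded A block, scan all loaded B blocks
--     and emit a GeMM whenever the inner dimensions match (no index built)."""
--     operations = []
--     for a_idx in load_A:
--         i, k = euclidian_division(a_idx, A_blocks_col)
--         for b_idx in load_B:
--             k2, j = euclidian_division(b_idx, B_blocks_col)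
--             if k2 == k:
--                 operations.append(("GeMM", i * X_blocks_col + j, a_idx, b_idx))
--     return operations
-- ===== Notes on version B (the rewrite author's own statement) =====
-- stated objective: simpler
-- what changed: Replaced the build-a-dict-of-B-rows-then-lookup strategy with a direct nested loop over load_A and load_B that tests the shared inner index k, keeping the same load_A-outer/load_B-inner output order.
import Mathlib
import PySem

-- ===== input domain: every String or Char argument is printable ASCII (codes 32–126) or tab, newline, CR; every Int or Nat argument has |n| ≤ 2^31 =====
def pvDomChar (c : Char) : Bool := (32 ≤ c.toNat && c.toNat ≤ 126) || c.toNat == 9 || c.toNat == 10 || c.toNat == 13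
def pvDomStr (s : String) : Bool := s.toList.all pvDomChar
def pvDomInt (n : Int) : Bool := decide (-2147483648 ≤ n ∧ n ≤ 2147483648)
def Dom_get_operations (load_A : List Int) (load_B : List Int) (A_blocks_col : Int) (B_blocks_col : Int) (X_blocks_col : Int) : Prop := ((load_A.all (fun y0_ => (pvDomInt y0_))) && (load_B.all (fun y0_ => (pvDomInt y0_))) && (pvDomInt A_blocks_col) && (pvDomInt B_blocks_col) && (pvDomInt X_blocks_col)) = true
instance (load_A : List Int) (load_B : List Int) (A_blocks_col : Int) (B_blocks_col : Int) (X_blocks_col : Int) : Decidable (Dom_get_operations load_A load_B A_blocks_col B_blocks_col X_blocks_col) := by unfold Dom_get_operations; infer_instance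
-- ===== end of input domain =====

-- B drops A's b_lookup dict and instead scans load_B for each a_idx (nested double loop), same output.

-- ===== PORT A =====
-- euclidian_division(dividend, divisor) = (dividend // divisor, dividend % divisor)
def euclidian_division (dividend : Int) (divisor : Int) : Int × Int :=
  (PySem.Int.floordiv dividend divisor, PySem.Int.mod dividend divisor)

def get_operations (load_A : List Int) (load_B : List Int) (A_blocks_col : Int) (B_blocks_col : Int) (X_blocks_col : Int) : List (String × Int × Int × Int) :=
  -- b_lookup: for b_idx in load_B: k,j = eucl(b_idx, B_blocks_col); if k not in b_lookup: b_lookup[k]=[]; b_lookup[k].append((j,b_idx))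
  let b_lookup : PySem.Dict Int (List (Int × Int)) :=
    load_B.foldl (fun d b_idx =>
      let kj := euclidian_division b_idx B_blocks_col
      let d := if d.contains kj.1 then d else d.insert kj.1 []
      d.modify kj.1 [] (fun l => l ++ [(kj.2, b_idx)])) PySem.Dict.empty
  load_A.foldl (fun operations a_idx =>
    let ik := euclidian_division a_idx A_blocks_col
    if b_lookup.contains ik.2 then
      (b_lookup.getD ik.2 []).foldl (fun operations jb =>
        operations ++ [("GeMM", ik.1 * X_blocks_col + jb.1, a_idx, jb.2)]) operations
    else operations) []

-- ===== PORT B =====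
def get_operations_alt (load_A : List Int) (load_B : List Int) (A_blocks_col : Int) (B_blocks_col : Int) (X_blocks_col : Int) : List (String × Int × Int × Int) :=
  load_A.foldl (fun operations a_idx =>
    let ik := euclidian_division a_idx A_blocks_col
    load_B.foldl (fun operations b_idx =>
      let kj := euclidian_division b_idx B_blocks_col
      if kj.1 == ik.2 then
        operations ++ [("GeMM", ik.1 * X_blocks_col + kj.2, a_idx, b_idx)]
      else operations) operations) []

-- ===== PRECONDITION & SPEC =====
-- Pre_ excludes exactly the inputs on which Python A raises ZeroDivisionError:
-- a zero divisor used on a non-empty list of block indices.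
def Pre_get_operations (load_A : List Int) (load_B : List Int) (A_blocks_col : Int) (B_blocks_col : Int) (X_blocks_col : Int) : Prop :=
  (load_A ≠ [] → A_blocks_col ≠ 0) ∧ (load_B ≠ [] → B_blocks_col ≠ 0)
instance (load_A : List Int) (load_B : List Int) (A_blocks_col : Int) (B_blocks_col : Int) (X_blocks_col : Int) : Decidable (Pre_get_operations load_A load_B A_blocks_col B_blocks_col X_blocks_col) := by unfold Pre_get_operations; infer_instance

def pvWitness_get_operations : List Int × List Int × Int × Int × Int := ([0, 1, 2, 5], [0, 1, 3, 4], 2, 2, 3)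

def Spec_get_operations (load_A : List Int) (load_B : List Int) (A_blocks_col : Int) (B_blocks_col : Int) (X_blocks_col : Int) (out : List (String × Int × Int × Int)) : Prop := out = get_operations_alt load_A load_B A_blocks_col B_blocks_col X_blocks_col
instance (load_A : List Int) (load_B : List Int) (A_blocks_col : Int) (B_blocks_col : Int) (X_blocks_col : Int) (out : List (String × Int × Int × Int)) : Decidable (Spec_get_operations load_A load_B A_blocks_col B_blocks_col X_blocks_col out) := by unfold Spec_get_operations; infer_instance

-- ===== CLAIM (what is proved, stated in full; the proofs are below) =====
def Claim_equal_get_operations : Prop := ∀ (load_A : List Int) (load_B : List Int) (A_blocks_col : Int) (B_blocks_col : Int) (X_blocks_col : Int), Dom_get_operations load_A load_B A_blocks_col B_blocks_col X_blocks_col → Pre_get_operations load_A load_B A_blocks_col B_blocks_col X_blocks_col → Spec_get_operations load_A load_B A_blocks_col B_blocks_col X_blocks_col (get_operations load_A load_B A_blocks_col B_blocks_col X_blocks_col)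


-- ===== LEMMAS AND PROOFS =====

-- getD returns the default on an absent key.
theorem pv_getD_not_contains {κ ν : Type} [BEq κ] [LawfulBEq κ] (d : PySem.Dict κ ν) (k : κ) (v : ν)
    (h : d.contains k = false) : d.getD k v = v := by
  simp [PySem.Dict.getD, (PySem.Dict.get?_eq_none_iff_contains d k).2 h]

-- One step of A's b_lookup-building loop, seen through getD.
theorem pv_step_getD (d : PySem.Dict Int (List (Int × Int))) (b_idx B_blocks_col k : Int) :
    ((let kj := euclidian_division b_idx B_blocks_col
      let d := if d.contains kj.1 then d else d.insert kj.1 []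
      d.modify kj.1 [] (fun l => l ++ [(kj.2, b_idx)])).getD k [])
    = (if k = PySem.Int.floordiv b_idx B_blocks_col
        then d.getD k [] ++ [(PySem.Int.mod b_idx B_blocks_col, b_idx)]
        else d.getD k []) := by
  simp only [euclidian_division]
  rw [PySem.Dict.getD_modify]
  cases hc : d.contains (PySem.Int.floordiv b_idx B_blocks_col) with
  | true =>
    simp only [if_pos rfl]
    split_ifs with hk
    · simp [hk]
    · rfl
  | false =>
    simp only [Bool.false_eq_true, if_false]
    by_cases hk : k = PySem.Int.floordiv b_idx B_blocks_col
    · rw [if_pos hk, if_pos hk, hk, PySem.Dict.getD_insert_self,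
        pv_getD_not_contains d _ [] hc]
    · rw [if_neg hk, if_neg hk, PySem.Dict.getD_insert_of_ne d [] [] hk]

-- b_lookup's bucket for k is the (j, b) list of the matching B blocks, in load_B order.
theorem pv_lookup_getD (load_B : List Int) (B_blocks_col k : Int)
    (d : PySem.Dict Int (List (Int × Int))) :
    ((load_B.foldl (fun d b_idx =>
      let kj := euclidian_division b_idx B_blocks_col
      let d := if d.contains kj.1 then d else d.insert kj.1 []
      d.modify kj.1 [] (fun l => l ++ [(kj.2, b_idx)])) d).getD k [])
    = d.getD k [] ++ ((load_B.filter (fun b => PySem.Int.floordiv b B_blocks_col == k)).map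
        (fun b => (PySem.Int.mod b B_blocks_col, b))) := by
  induction load_B generalizing d with
  | nil => simp
  | cons b rest ih =>
    simp only [List.foldl_cons, List.filter_cons]
    rw [ih, pv_step_getD]
    by_cases hk : k = PySem.Int.floordiv b B_blocks_col
    · simp [hk.symm, List.append_assoc]
    · simp [hk, Ne.symm hk]

-- ===== VERDICT (by name: the statement is the Claim_ definition above) =====
theorem get_operations_spec : Claim_equal_get_operations := by
  intro load_A load_B A_blocks_col B_blocks_col X_blocks_col _ _
  unfold Spec_get_operations get_operations get_operations_alt
  apply PySem.List.foldl_congr_mem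
  intro acc a_idx _
  simp only []
  rw [PySem.List.foldl_append_if]
  by_cases hc : ((load_B.foldl (fun d b_idx =>
      let kj := euclidian_division b_idx B_blocks_col
      let d := if d.contains kj.1 then d else d.insert kj.1 []
      d.modify kj.1 [] (fun l => l ++ [(kj.2, b_idx)])) PySem.Dict.empty).contains
      (euclidian_division a_idx A_blocks_col).2) = true
  · rw [if_pos hc, PySem.List.foldl_append_singleton_eq_map, pv_lookup_getD,
      pv_getD_not_contains PySem.Dict.empty _ [] rfl]
    simp [List.map_map, Function.comp, euclidian_division]
  · rw [if_neg (by simp [hc])]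
    have h0 := pv_getD_not_contains _ _ [] (by simpa using hc)
    rw [pv_lookup_getD, pv_getD_not_contains PySem.Dict.empty _ [] rfl] at h0
    simp only [List.nil_append] at h0
    rw [List.map_eq_nil_iff] at h0
    simp only [euclidian_division] at h0 ⊢
    rw [h0]
    simp
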